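-- pv_equiv track=rewrite | github.com/ssarangi/algorithms | greedy/grid_challenge.py | lex_sort
-- ===== SOURCE A (Python) =====
-- def lex_sort(arr):
--     possible = "NO"
--
--     # figure out the 1st Row and 1st Column
--     row = []
--     col = []
--
--     for c in arr[0]:
--         row.append(c)
--
--     for c in arr:
--         col.append(c[0])
--
--     row = sorted(row)
--     col = sorted(col)
--
--     if row[0] < col[0]:
--         possible = "YES"
--
--     return possible
-- ===== SOURCE B (Python) =====
-- def lex_sort(arr):
--     # single linear scan for each minimum instead of building + sorting lists
--     row_min = arr[0][0]
--     for ch in arr[0]: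
--         if ch < row_min:
--             row_min = ch
--     col_min = arr[0][0]
--     for s in arr:
--         if s[0] < col_min:
--             col_min = s[0]
--     return "YES" if row_min < col_min else "NO"
-- ===== Notes on version B (the rewrite author's own statement) =====
-- stated objective: simpler
-- what changed: Replaces building two lists and sorting each (taking the sorted head) by two running-minimum linear scans, comparing the minimum of the first row's characters with the minimum of the first column.
import Mathlib
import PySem

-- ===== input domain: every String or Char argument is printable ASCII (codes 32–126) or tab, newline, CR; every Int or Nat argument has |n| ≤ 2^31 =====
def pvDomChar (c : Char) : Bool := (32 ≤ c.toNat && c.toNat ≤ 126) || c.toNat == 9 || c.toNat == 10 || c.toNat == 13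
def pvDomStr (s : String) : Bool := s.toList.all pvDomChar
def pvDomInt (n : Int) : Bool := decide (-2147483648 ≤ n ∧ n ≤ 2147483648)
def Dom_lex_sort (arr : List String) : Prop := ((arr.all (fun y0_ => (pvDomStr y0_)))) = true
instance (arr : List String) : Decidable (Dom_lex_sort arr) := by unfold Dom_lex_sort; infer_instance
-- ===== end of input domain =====

-- B replaces building and sorting the first row / first column by two running-minimum scans (simpler).

-- ===== PORT A =====
def lex_sort (arr : List String) : String :=
  match arr with
  | [] => "NO"  -- arr[0] raises IndexError here; outside Pre_
  | a0 :: _ =>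
    let row := a0.toList.foldl (fun acc ch => acc ++ [ch]) []
    -- c[0]: the ' ' default is only reachable on an empty string, outside Pre_
    let col := arr.foldl (fun acc s => acc ++ [s.toList.headD ' ']) []
    let rowS := PySem.List.sorted row (fun x => x) false
    let colS := PySem.List.sorted col (fun x => x) false
    match rowS, colS with
    | r0 :: _, c0 :: _ => if r0 < c0 then "YES" else "NO"
    | _, _ => "NO"  -- row[0] raises IndexError (empty first row); outside Pre_

-- ===== PORT B =====
def lex_sort_alt (arr : List String) : String :=
  match arr with
  | [] => "NO"  -- arr[0][0] raises IndexError here; outside Pre_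
  | a0 :: _ =>
    match a0.toList with
    | [] => "NO"  -- arr[0][0] raises IndexError here; outside Pre_
    | c :: cs =>
      let rowMin := cs.foldl (fun m ch => if ch < m then ch else m) c
      let colMin := arr.foldl (fun m s =>
        match s.toList with
        | [] => m  -- s[0] raises IndexError here; outside Pre_
        | d :: _ => if d < m then d else m) c
      if rowMin < colMin then "YES" else "NO"

-- ===== PRECONDITION & SPEC =====
-- Pre_: A raises IndexError on an empty arr (arr[0]) and on any empty string in arr
-- (c[0], or sorted(row)[0] for an empty first row); exactly those inputs are excluded.
def Pre_lex_sort (arr : List String) : Prop := arr ≠ [] ∧ ∀ s ∈ arr, s.toList ≠ []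
instance (arr : List String) : Decidable (Pre_lex_sort arr) := by unfold Pre_lex_sort; infer_instance
def pvWitness_lex_sort : List String := ["ba", "cd"]

def Spec_lex_sort (arr : List String) (out : String) : Prop := out = lex_sort_alt arr
instance (arr : List String) (out : String) : Decidable (Spec_lex_sort arr out) := by unfold Spec_lex_sort; infer_instance

-- ===== CLAIM (what is proved, stated in full; the proofs are below) =====
def Claim_equal_lex_sort : Prop := ∀ (arr : List String), Dom_lex_sort arr → Pre_lex_sort arr → Spec_lex_sort arr (lex_sort arr)

-- ===== LEMMAS AND PROOFS =====

-- the running-minimum fold computes a minimal member of c :: cs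
lemma foldMin_spec (c : Char) (cs : List Char) :
    (cs.foldl (fun m x => if x < m then x else m) c) ∈ c :: cs ∧
    ∀ y ∈ c :: cs, (cs.foldl (fun m x => if x < m then x else m) c) ≤ y := by
  induction cs generalizing c with
  | nil => simp
  | cons d ds ih =>
    simp only [List.foldl_cons]
    by_cases h : d < c
    · simp only [if_pos h]
      obtain ⟨hm, hle⟩ := ih d
      refine ⟨?_, ?_⟩
      · rcases List.mem_cons.mp hm with h1 | h1 <;> simp [h1]
      · intro y hy
        rcases List.mem_cons.mp hy with rfl | hy'
        · exact le_of_lt (lt_of_le_of_lt (hle d (by simp)) h)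
        · exact hle y hy'
    · simp only [if_neg h]
      obtain ⟨hm, hle⟩ := ih c
      refine ⟨?_, ?_⟩
      · rcases List.mem_cons.mp hm with h1 | h1 <;> simp [h1]
      · intro y hy
        rcases List.mem_cons.mp hy with rfl | hy'
        · exact hle y (by simp)
        rcases List.mem_cons.mp hy' with rfl | hy''
        · exact le_trans (hle c (by simp)) (not_lt.mp h)
        · exact hle y (by simp [hy''])

-- the head of the sorted list equals any minimal member
lemma sorted_head_eq_min (l t : List Char) (m r : Char)
    (h : PySem.List.sorted l (fun x => x) false = m :: t)
    (hmem : r ∈ l) (hle : ∀ y ∈ l, r ≤ y) : m = r := by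
  have hperm := PySem.List.sorted_perm l (fun x => x) false
  rw [h] at hperm
  have hm : m ∈ l := hperm.mem_iff.mp (by simp)
  exact le_antisymm (PySem.List.key_head_sorted_le l (fun x => x) h r hmem) (hle m hm)

-- B's column fold over nonempty strings is the running-minimum fold over their first chars
lemma fold_first_eq (L : List String) (hL : ∀ s ∈ L, s.toList ≠ []) (m : Char) :
    L.foldl (fun m s =>
      match s.toList with
      | [] => m
      | d :: _ => if d < m then d else m) m
    = (L.map (fun s => s.toList.headD ' ')).foldl (fun m x => if x < m then x else m) m := by
  induction L generalizing m with
  | nil => rfl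
  | cons s L' ih =>
    obtain ⟨d, ds, hd⟩ := List.exists_cons_of_ne_nil (hL s (by simp))
    simp only [List.foldl_cons, List.map_cons, hd, List.headD_cons]
    exact ih (fun t ht => hL t (by simp [ht])) _

-- ===== VERDICT (by name: the statement is the Claim_ definition above) =====
theorem lex_sort_spec : Claim_equal_lex_sort := by
  intro arr _ hpre
  obtain ⟨hne, hall⟩ := hpre
  unfold Spec_lex_sort
  match arr with
  | [] => exact absurd rfl hne
  | a0 :: rest =>
    obtain ⟨c, cs, hcc⟩ := List.exists_cons_of_ne_nil (hall a0 (by simp))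
    simp only [lex_sort, lex_sort_alt, hcc,
      PySem.List.foldl_append_singleton, PySem.List.foldl_append_singleton_eq_map,
      List.nil_append]
    -- the row list is a0's chars; the col list is the first chars
    have hrowne : PySem.List.sorted (c :: cs) (fun x => x) false ≠ [] := by
      simp [PySem.List.sorted_eq_nil_iff]
    have hcolmap : (a0 :: rest).map (fun s => s.toList.headD ' ')
        = c :: rest.map (fun s => s.toList.headD ' ') := by simp [hcc]
    obtain ⟨r0, rt, hrs⟩ := List.exists_cons_of_ne_nil hrowne
    have hcolne : PySem.List.sorted ((a0 :: rest).map (fun s => s.toList.headD ' '))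
        (fun x => x) false ≠ [] := by
      simp [PySem.List.sorted_eq_nil_iff]
    obtain ⟨c0, ct, hcs⟩ := List.exists_cons_of_ne_nil hcolne
    -- identify the two sorted heads with the running minima
    obtain ⟨hm1, hle1⟩ := foldMin_spec c cs
    have hr0 : r0 = cs.foldl (fun m x => if x < m then x else m) c :=
      sorted_head_eq_min _ _ _ _ hrs hm1 hle1
    obtain ⟨hm2, hle2⟩ := foldMin_spec c (rest.map (fun s => s.toList.headD ' '))
    have hc0 : c0 = (rest.map (fun s => s.toList.headD ' ')).foldl
        (fun m x => if x < m then x else m) c := by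
      rw [hcolmap] at hcs
      exact sorted_head_eq_min _ _ _ _ hcs hm2 hle2
    -- B's column fold equals the same running minimum
    have hbcol : (a0 :: rest).foldl (fun m s =>
        match s.toList with
        | [] => m
        | d :: _ => if d < m then d else m) c
        = (rest.map (fun s => s.toList.headD ' ')).foldl (fun m x => if x < m then x else m) c := by
      rw [fold_first_eq (a0 :: rest) hall c, hcolmap]
      simp only [List.foldl_cons, if_neg (lt_irrefl c)]
    rw [hrs, hcs]
    simp only [hr0, hc0, hbcol]
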